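-- pv_equiv track=rewrite | github.com/reixyz22/Advent-Of-Code | 1.5.py | freq_set
-- ===== SOURCE A (Python) =====
-- def freq_set(lst, bad):
--     """
--     Create a frequency dictionary for elements in the list, excluding 'bad' items.
--
--     Args:
--         lst (list): The list of elements to analyze.
--         bad (list): Items to exclude from frequency calculation.
--
--     Returns:
--         dict: A dictionary where keys are elements and values are their frequencies.
--     """
--     freq = {}
--     for num in lst:
--         if num in bad:
--             continue
--         elif num not in freq:
--             freq[num] = 1
--         else:
--             freq[num] += 1
--     return freq
-- ===== SOURCE B (Python) =====
-- def freq_set(lst, bad):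
--     """
--     Create a frequency dictionary for elements in the list, excluding 'bad' items.
--
--     Take the distinct elements in first-appearance order, then count each one's
--     occurrences in the whole list, skipping the bad ones.
--     """
--     return {k: lst.count(k) for k in dict.fromkeys(lst) if k not in bad}
-- ===== Notes on version B (the rewrite author's own statement) =====
-- stated objective: simpler
-- what changed: B first collects the distinct elements in first-appearance order (dict.fromkeys) and then counts each surviving key with lst.count in a dict comprehension, instead of A's single pass that skips bad items and increments a running tally per element.
import Mathlib
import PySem

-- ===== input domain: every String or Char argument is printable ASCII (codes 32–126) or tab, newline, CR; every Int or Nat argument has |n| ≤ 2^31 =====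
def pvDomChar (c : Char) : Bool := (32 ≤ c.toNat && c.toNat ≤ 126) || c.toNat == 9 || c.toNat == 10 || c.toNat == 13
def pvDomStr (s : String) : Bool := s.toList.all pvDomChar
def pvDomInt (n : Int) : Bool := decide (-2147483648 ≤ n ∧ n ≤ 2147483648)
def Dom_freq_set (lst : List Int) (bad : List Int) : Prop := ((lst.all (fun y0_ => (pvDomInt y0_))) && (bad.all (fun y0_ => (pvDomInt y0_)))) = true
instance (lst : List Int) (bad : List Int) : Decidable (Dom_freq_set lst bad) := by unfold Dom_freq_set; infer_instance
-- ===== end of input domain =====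

-- B lists the distinct elements in first-appearance order and counts each surviving key
-- over the whole list, instead of A's skip-and-tally single pass (objective: simpler).


-- ===== PORT A =====
def freq_set (lst : List Int) (bad : List Int) : List (Int × Int) :=
  (lst.foldl (fun freq num =>
      if num ∈ bad then freq
      else if freq.contains num = false then freq.insert num 1
      else freq.modify num 0 (· + 1))
    (PySem.Dict.empty : PySem.Dict Int Int)).items

-- ===== PORT B =====
def freq_set_alt (lst : List Int) (bad : List Int) : List (Int × Int) :=
  (((PySem.List.dedup lst).filter (fun k => !decide (k ∈ bad))).foldl
      (fun (d : PySem.Dict Int Int) k => d.insert k (PySem.List.count lst k : Int))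
      PySem.Dict.empty).items

-- ===== PRECONDITION & SPEC =====
def Spec_freq_set (lst : List Int) (bad : List Int) (out : List (Int × Int)) : Prop := out = freq_set_alt lst bad
instance (lst : List Int) (bad : List Int) (out : List (Int × Int)) : Decidable (Spec_freq_set lst bad out) := by unfold Spec_freq_set; infer_instance

-- ===== CLAIM (what is proved, stated in full; the proofs are below) =====
def Claim_equal_freq_set : Prop := ∀ (lst : List Int) (bad : List Int), Dom_freq_set lst bad → Spec_freq_set lst bad (freq_set lst bad)

-- ===== LEMMAS AND PROOFS =====

-- a loop that skips the elements of bad is a loop over the filtered list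
lemma foldl_skip_bad {β : Type} (bad : List Int) (f : β → Int → β) :
    ∀ (l : List Int) (init : β),
      l.foldl (fun d x => if x ∈ bad then d else f d x) init
        = (l.filter (fun x => !decide (x ∈ bad))).foldl f init := by
  intro l
  induction l with
  | nil => intro init; rfl
  | cons x xs ih =>
      intro init
      by_cases hx : x ∈ bad <;> simp [hx, ih]

-- A's insert-or-bump body is exactly one counting step of Counter
lemma stepA_eq_counter_step :
    (fun (freq : PySem.Dict Int Int) num =>
        if freq.contains num = false then freq.insert num 1
        else freq.modify num 0 (· + 1))
      = fun (d : PySem.Dict Int Int) x => d.modify x 0 (· + 1) := by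
  funext d x
  by_cases h : d.contains x = true
  · simp [h]
  · have h' : d.contains x = false := by simpa using h
    have hg : d.getD x 0 = 0 := by simp [pysem, h']
    show (if d.contains x = false then d.insert x 1 else _) = d.insert x (d.getD x 0 + 1)
    rw [if_pos h', hg]
    norm_num

-- first-occurrence dedup commutes with filtering
lemma ofList_filter (q : Int → Bool) :
    ∀ (l : List Int), PySem.Set.ofList (l.filter q) = (PySem.Set.ofList l).filter q := by
  intro l
  induction l with
  | nil => rfl
  | cons x xs ih =>
      rw [List.filter_cons, PySem.Set.ofList_cons]
      by_cases hq : q x = true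
      · rw [if_pos hq, PySem.Set.ofList_cons, ih]
        rw [List.filter_cons, if_pos hq]
        refine congrArg (x :: ·) ?_
        show ((PySem.Set.ofList xs).filter q).filter (fun y => !(y == x))
              = ((PySem.Set.ofList xs).filter (fun y => !(y == x))).filter q
        rw [List.filter_filter, List.filter_filter]
        exact List.filter_congr fun y _ => Bool.and_comm _ _
      · have hq' : q x = false := by simpa using hq
        rw [if_neg hq, ih, List.filter_cons, if_neg (by simp [hq'])]
        show List.filter q (PySem.Set.ofList xs)
              = List.filter q ((PySem.Set.ofList xs).filter (fun y => !(y == x)))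
        rw [List.filter_filter]
        refine (List.filter_congr fun y _ => ?_).symm
        by_cases hyx : y = x
        · subst hyx; simp [hq']
        · simp [hyx]

-- ===== VERDICT (by name: the statement is the Claim_ definition above) =====
theorem freq_set_spec : Claim_equal_freq_set := by
  intro lst bad _
  unfold Spec_freq_set freq_set freq_set_alt
  rw [foldl_skip_bad bad, stepA_eq_counter_step,
      ← PySem.Dict.counter_eq_foldl, PySem.Dict.items_counter,
      PySem.List.dedup_eq_ofList, ← ofList_filter]
  rw [PySem.Dict.items_foldl_insert_fresh]
  · rw [show (PySem.Dict.empty : PySem.Dict Int Int).items = [] from rfl, List.nil_append]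
    refine List.map_congr_left fun k hk => ?_
    have hq : (!decide (k ∈ bad)) = true :=
      (List.mem_filter.mp ((PySem.Set.mem_ofList _ _).mp hk)).2
    rw [PySem.List.count_eq, List.count_filter (p := fun x => !decide (x ∈ bad)) hq]
  · intro a _; simp
  · simp only [List.map_id_fun', id]
    exact (PySem.Set.nodup_ofList (lst.filter (fun x => !decide (x ∈ bad))))
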